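-- pv_equiv track=rewrite | github.com/trungduc81/Python_Code_PTIT | ICPC0105 - TÌM SỐ LỚN NHẤT.py | solve
-- ===== SOURCE A (Python) =====
-- def solve(s):
--     res = -10**18
--     n = ""
--     for i in range(len(s)):
--         if(s[i].isdigit()) : n += s[i]
--         else:
--             if n != "":
--                 res = max(res, int(n))
--                 n = ""
--     if n != "":
--         res = max(res,int(n))
--     return res
-- ===== SOURCE B (Python) =====
-- def solve(s):
--     # tokenize: blank out every non-digit, split into maximal digit runs, reduce with max
--     tokens = "".join(c if c.isdigit() else " " for c in s).split()
--     return max((int(t) for t in tokens), default=-10**18)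
-- ===== Notes on version B (the rewrite author's own statement) =====
-- stated objective: idiomatic
-- what changed: Replaced A's char-by-char state machine with running buffer and max-updates by a tokenize-then-reduce decomposition: mask non-digits to spaces, str.split() collects the maximal digit runs, then a single max(..., default=-10**18) over their int values.
import Mathlib
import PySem

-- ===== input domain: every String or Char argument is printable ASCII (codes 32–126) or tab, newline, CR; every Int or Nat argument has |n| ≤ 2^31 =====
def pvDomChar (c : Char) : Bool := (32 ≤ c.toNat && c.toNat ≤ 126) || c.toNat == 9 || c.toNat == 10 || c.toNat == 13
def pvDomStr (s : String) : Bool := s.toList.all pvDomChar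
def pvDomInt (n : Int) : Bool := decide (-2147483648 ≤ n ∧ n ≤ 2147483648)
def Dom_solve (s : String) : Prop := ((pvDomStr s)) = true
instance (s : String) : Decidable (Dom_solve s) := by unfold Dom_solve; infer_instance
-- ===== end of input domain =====

-- B replaces A's char-by-char state machine with a running buffer by tokenize-then-reduce
-- (mask non-digits to spaces, split on whitespace, one max with a default); objective: more
-- idiomatic, same cost.

-- ===== PORT A =====
-- int(n): exact here, since every buffer passed to it is a nonempty run of ASCII digits
def pvInt (cs : List Char) : Int := (PySem.Int.ofChars? cs).getD 0

def solveStep (st : Int × List Char) (c : Char) : Int × List Char :=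
  if PySem.Chars.isdigit c then (st.1, st.2 ++ [c])
  else if st.2 ≠ [] then (max st.1 (pvInt st.2), []) else st

def solve (s : String) : Int :=
  let st := s.toList.foldl solveStep (-(10 ^ 18), [])
  if st.2 ≠ [] then max st.1 (pvInt st.2) else st.1

-- ===== PORT B =====
def solve_alt (s : String) : Int :=
  let tokens := PySem.Chars.split₀ (s.toList.map (fun c => if PySem.Chars.isdigit c then c else ' '))
  PySem.List.maxD (tokens.map pvInt) id (-(10 ^ 18))

-- ===== PRECONDITION & SPEC =====
def Spec_solve (s : String) (out : Int) : Prop := out = solve_alt s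
instance (s : String) (out : Int) : Decidable (Spec_solve s out) := by unfold Spec_solve; infer_instance

-- ===== CLAIM (what is proved, stated in full; the proofs are below) =====
def Claim_equal_solve : Prop := ∀ (s : String), Dom_solve s → Spec_solve s (solve s)

-- ===== LEMMAS AND PROOFS =====

-- the maximal digit runs of a character list (proof-side characterisation shared by both ports)
def digitRuns : List Char → List (List Char)
  | [] => []
  | c :: cs =>
    if PySem.Chars.isdigit c then
      (c :: cs.takeWhile PySem.Chars.isdigit) :: digitRuns (cs.dropWhile PySem.Chars.isdigit)
    else digitRuns cs
termination_by cs => cs.length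
decreasing_by
  · simp only [List.length_cons]
    exact Nat.lt_succ_of_le (List.length_dropWhile_le _ _)
  · simp

theorem isspace_of_isdigit (c : Char) (h : PySem.Chars.isdigit c = true) :
    PySem.Chars.isspace c = false := by
  simp only [PySem.Chars.isdigit, Bool.and_eq_true, decide_eq_true_eq, Char.le_def] at h
  have h1 : 48 ≤ c.toNat := by exact_mod_cast UInt32.le_iff_toNat_le.mp h.1
  have h2 : c.toNat ≤ 57 := by exact_mod_cast UInt32.le_iff_toNat_le.mp h.2
  simp only [PySem.Chars.isspace, Char.toNat] at *
  simp only [Bool.or_eq_false_iff, Bool.and_eq_false_iff, decide_eq_false_iff_not]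
  omega

theorem isIntSpace_of_isdigit (c : Char) (h : PySem.Chars.isdigit c = true) :
    PySem.Int.isIntSpace c = false := by
  simp only [PySem.Chars.isdigit, Bool.and_eq_true, decide_eq_true_eq, Char.le_def] at h
  have h1 : 48 ≤ c.toNat := by exact_mod_cast UInt32.le_iff_toNat_le.mp h.1
  have h2 : c.toNat ≤ 57 := by exact_mod_cast UInt32.le_iff_toNat_le.mp h.2
  rw [Bool.eq_false_iff]
  intro htrue
  simp only [PySem.Int.isIntSpace, Bool.or_eq_true, decide_eq_true_eq] at htrue
  rcases htrue with ((((e | e) | e) | e) | e) | e <;> subst e <;>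
    simp [Char.toNat] at h1 h2

theorem pvInt_bind_nonneg (p : Option Nat) :
    0 ≤ ((Option.map (fun n => n) (p.bind fun a => some ((a : Int)))).getD 0) := by
  cases p <;> simp

theorem pvInt_nonneg (r : List Char) (hne : r ≠ [])
    (hd : ∀ c ∈ r, PySem.Chars.isdigit c = true) : 0 ≤ pvInt r := by
  have hsp : ∀ c ∈ r, PySem.Int.isIntSpace c = false := fun c hc =>
    isIntSpace_of_isdigit c (hd c hc)
  have h1 : List.dropWhile PySem.Int.isIntSpace r = r := by
    rw [List.dropWhile_eq_self_iff]
    intro hl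
    simp [hsp _ (List.getElem_mem hl)]
  have h2 : List.dropWhile PySem.Int.isIntSpace r.reverse = r.reverse := by
    rw [List.dropWhile_eq_self_iff]
    intro hl
    have := hsp _ (List.mem_reverse.mp (List.getElem_mem hl))
    simpa using this
  unfold pvInt PySem.Int.ofChars?
  rw [h1, h2, List.reverse_reverse]
  cases r with
  | nil => exact absurd rfl hne
  | cons c rs =>
    have hc := hd c (by simp)
    simp only [PySem.Chars.isdigit, Bool.and_eq_true, decide_eq_true_eq, Char.le_def] at hc
    have h48 : 48 ≤ c.toNat := by exact_mod_cast UInt32.le_iff_toNat_le.mp hc.1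
    dsimp only
    split
    · rename_i ds heq
      injection heq with hc' _
      subst hc'
      simp [Char.toNat] at h48
    · rename_i ds heq
      injection heq with hc' _
      subst hc'
      simp [Char.toNat] at h48
    · exact pvInt_bind_nonneg _

theorem digitRuns_spec (cs : List Char) : ∀ r ∈ digitRuns cs,
    r ≠ [] ∧ ∀ c ∈ r, PySem.Chars.isdigit c = true := by
  induction cs using digitRuns.induct with
  | case1 => simp [digitRuns]
  | case2 c cs hd ih =>
    intro r hr
    rw [digitRuns, if_pos hd] at hr
    rcases List.mem_cons.mp hr with rfl | hr
    · refine ⟨by simp, ?_⟩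
      intro x hx
      rcases List.mem_cons.mp hx with rfl | hx
      · exact hd
      · exact List.mem_takeWhile_imp hx
    · exact ih r hr
  | case3 c cs hd ih =>
    intro r hr
    rw [digitRuns, if_neg hd] at hr
    exact ih r hr

theorem solve_loop_spec (cs : List Char) : ∀ (res : Int) (n : List Char),
    (let st := cs.foldl solveStep (res, n)
     if st.2 ≠ [] then max st.1 (pvInt st.2) else st.1) =
    (if n = [] then ((digitRuns cs).map pvInt).foldl max res
     else ((digitRuns (cs.dropWhile PySem.Chars.isdigit)).map pvInt).foldl max
            (max res (pvInt (n ++ cs.takeWhile PySem.Chars.isdigit)))) := by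
  induction cs with
  | nil =>
    intro res n
    by_cases hn : n = [] <;> simp [hn, digitRuns]
  | cons c cs ih =>
    intro res n
    by_cases hd : PySem.Chars.isdigit c
    · by_cases hn : n = []
      · simp only [List.foldl_cons, solveStep, hd, if_true, hn]
        have := ih res [c]
        simp only at this
        simp [this, digitRuns, hd]
      · simp only [List.foldl_cons, solveStep, hd, if_true]
        have := ih res (n ++ [c])
        simp only at this
        simp [this, hn, hd]
    · by_cases hn : n = []
      · simp only [List.foldl_cons, solveStep, hd, if_false, hn, ne_eq, not_true_eq_false,
          Bool.false_eq_true]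
        have := ih res []
        simp only at this
        simp [this, digitRuns, hd]
      · simp only [List.foldl_cons, solveStep, hd, Bool.false_eq_true, if_false, ne_eq, hn,
          not_false_eq_true, if_true]
        have := ih (max res (pvInt n)) []
        simp only at this
        simp [this, digitRuns, hd]

theorem split_mask_eq_digitRuns_go (cs : List Char) : ∀ (cur : List Char) (acc : List (List Char)),
    (∀ c ∈ cur, PySem.Chars.isdigit c = true) →
    PySem.Chars.split₀.go (cs.map (fun c => if PySem.Chars.isdigit c then c else ' ')) cur acc =
    acc.reverse ++
      (if cur = [] then digitRuns cs
       else (cur.reverse ++ cs.takeWhile PySem.Chars.isdigit) ::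
              digitRuns (cs.dropWhile PySem.Chars.isdigit)) := by
  induction cs with
  | nil =>
    intro cur acc _
    by_cases hc : cur = [] <;> simp [PySem.Chars.split₀.go, hc, digitRuns, List.isEmpty_iff]
  | cons c cs ih =>
    intro cur acc hcur
    by_cases hd : PySem.Chars.isdigit c
    · have hsp := isspace_of_isdigit c hd
      simp only [List.map_cons, hd, if_true, PySem.Chars.split₀.go, hsp, Bool.false_eq_true,
        if_false]
      have := ih (c :: cur) acc (by
        intro x hx
        rcases List.mem_cons.mp hx with rfl | hx
        · exact hd
        · exact hcur x hx)
      rw [this]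
      by_cases hc : cur = [] <;> simp [hc, digitRuns, hd]
    · have hsp : PySem.Chars.isspace ' ' = true := by decide
      simp only [List.map_cons, hd, Bool.false_eq_true, if_false, PySem.Chars.split₀.go, hsp,
        if_true]
      by_cases hc : cur = []
      · simp only [hc, List.isEmpty_nil, if_true]
        rw [ih [] acc (by simp)]
        simp [digitRuns, hd]
      · simp only [List.isEmpty_iff, hc, if_false]
        rw [ih [] (cur.reverse :: acc) (by simp)]
        simp [digitRuns, hd]

theorem max?_cons_getD (d : Int) : ∀ (ys : List Int) (m : Int),
    (PySem.List.max? (m :: ys) id).getD d = ys.foldl max m := by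
  intro ys
  induction ys with
  | nil => intro m; rfl
  | cons y ys ih =>
    intro m
    have h1 : PySem.List.max? (m :: y :: ys) id = PySem.List.max? (max m y :: ys) id := by
      simp only [PySem.List.max?, List.foldl_cons]
      by_cases hlt : m < y
      · simp [hlt, max_eq_right hlt.le]
      · simp [hlt, max_eq_left (not_lt.mp hlt)]
    rw [h1, ih, List.foldl_cons]

theorem maxD_id_eq_foldl (xs : List Int) (d : Int) (h : ∀ x ∈ xs, d ≤ x) :
    PySem.List.maxD xs id d = xs.foldl max d := by
  cases xs with
  | nil => rfl
  | cons x xs =>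
    have h0 : PySem.List.max? (x :: xs) id = PySem.List.max? (max d x :: xs) id := by
      rw [max_eq_right (h x (by simp))]
    simp only [PySem.List.maxD]
    rw [h0, max?_cons_getD, List.foldl_cons]

-- ===== VERDICT (by name: the statement is the Claim_ definition above) =====
theorem solve_spec : Claim_equal_solve := by
  intro s _
  unfold Spec_solve solve solve_alt PySem.Chars.split₀
  rw [split_mask_eq_digitRuns_go s.toList [] [] (by simp)]
  simp only [List.reverse_nil, List.nil_append, reduceIte]
  rw [maxD_id_eq_foldl _ _ (by
    intro x hx
    rcases List.mem_map.mp hx with ⟨r, hr, rfl⟩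
    obtain ⟨hne, hdig⟩ := digitRuns_spec s.toList r hr
    have := pvInt_nonneg r hne hdig
    omega)]
  have hl := solve_loop_spec s.toList (-(10 ^ 18)) []
  simp only [reduceIte] at hl
  simpa using hl
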